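-- pv_equiv track=rewrite | github.com/tsalemink/pointcloudpartitionerstep | mapclientplugins/pointcloudpartitionerstep/model/pointcloudpartitionermodel.py | _convert_to_element_list
-- ===== SOURCE A (Python) =====
-- def _convert_to_element_list(elements_list):
--     """
--     Take a list of element node indexes deliminated by -1 and convert
--     it into a list element node indexes list.
--     """
--     elements = []
--     current_element = []
--     for node_index in elements_list:
--         if node_index == -1:
--             elements.append(current_element)
--             current_element = []
--         else:
--             # We also add one to the indexes to suit Zinc node indexing
--             current_element.append(node_index + 1)
--
--     return elements
-- ===== SOURCE B (Python) =====
-- def _convert_to_element_list(elements_list):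
--     """
--     Take a list of element node indexes deliminated by -1 and convert
--     it into a list element node indexes list.
--
--     Repeatedly split off the segment before the next -1 sentinel;
--     whatever follows the last sentinel is not a complete element.
--     """
--     elements = []
--     rest = elements_list
--     while -1 in rest:
--         i = rest.index(-1)
--         # Add one to the indexes to suit Zinc node indexing
--         elements.append([n + 1 for n in rest[:i]])
--         rest = rest[i + 1:]
--     return elements
-- ===== Notes on version B (the rewrite author's own statement) =====
-- stated objective: alternative
-- what changed: Replaces the single left-to-right accumulator pass with repeated splitting at the next -1 via index() and slicing, so each finished element is a mapped slice and the incomplete tail after the last sentinel is simply never split off.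
import Mathlib
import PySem

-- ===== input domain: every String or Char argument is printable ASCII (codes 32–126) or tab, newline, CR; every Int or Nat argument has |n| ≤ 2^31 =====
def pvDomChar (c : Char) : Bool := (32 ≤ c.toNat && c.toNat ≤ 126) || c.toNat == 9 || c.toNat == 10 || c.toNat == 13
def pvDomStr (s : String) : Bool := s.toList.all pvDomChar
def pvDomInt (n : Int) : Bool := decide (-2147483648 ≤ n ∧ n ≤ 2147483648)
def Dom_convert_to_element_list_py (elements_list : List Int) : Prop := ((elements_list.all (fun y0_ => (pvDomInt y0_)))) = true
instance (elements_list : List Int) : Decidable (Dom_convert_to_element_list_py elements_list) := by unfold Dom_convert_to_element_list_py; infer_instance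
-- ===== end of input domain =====

-- B replaces the accumulator pass with repeated splitting at the next -1 (index + slice); same cost, no speed claim.

-- ===== PORT A =====
-- state = (elements, current_element); left-to-right fold, return elements
def convert_to_element_list_py (elements_list : List Int) : List (List Int) :=
  (elements_list.foldl
    (fun (st : List (List Int) × List Int) node_index =>
      if node_index = -1 then (st.1 ++ [st.2], [])
      else (st.1, st.2 ++ [node_index + 1]))
    ([], [])).1

-- ===== PORT B =====
-- while -1 in rest: i = rest.index(-1); append mapped slice rest[:i]; rest = rest[i+1:]
-- (rest[:i] / rest[i+1:] with 0 ≤ i are exactly take i / drop (i+1))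
def convert_to_element_list_py_alt (rest : List Int) : List (List Int) :=
  match h : PySem.List.index? rest (-1) with
  | none => []
  | some i =>
      ((rest.take i).map (· + 1)) :: convert_to_element_list_py_alt (rest.drop (i + 1))
termination_by rest.length
decreasing_by
  have hne : rest ≠ [] := by
    intro hnil; subst hnil; simp [PySem.List.index?] at h
  have : 0 < rest.length := List.length_pos_iff.mpr hne
  simp [List.length_drop]; omega

-- ===== PRECONDITION & SPEC =====
def Spec_convert_to_element_list_py (elements_list : List Int) (out : List (List Int)) : Prop := out = convert_to_element_list_py_alt elements_list
instance (elements_list : List Int) (out : List (List Int)) : Decidable (Spec_convert_to_element_list_py elements_list out) := by unfold Spec_convert_to_element_list_py; infer_instance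

-- ===== CLAIM (what is proved, stated in full; the proofs are below) =====
def Claim_equal_convert_to_element_list_py : Prop := ∀ (elements_list : List Int), Dom_convert_to_element_list_py elements_list → Spec_convert_to_element_list_py elements_list (convert_to_element_list_py elements_list)

-- ===== LEMMAS AND PROOFS =====

-- reference recursion: segments closed by -1, current open segment `cur`
def segSpec (cur : List Int) : List Int → List (List Int)
  | [] => []
  | x :: t => if x = -1 then cur :: segSpec [] t else segSpec (cur ++ [x + 1]) t

-- A's fold equals acc ++ segSpec cur l
theorem foldA_eq (l : List Int) : ∀ (acc : List (List Int)) (cur : List Int),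
    (l.foldl
      (fun (st : List (List Int) × List Int) node_index =>
        if node_index = -1 then (st.1 ++ [st.2], [])
        else (st.1, st.2 ++ [node_index + 1]))
      (acc, cur)).1 = acc ++ segSpec cur l := by
  induction l with
  | nil => intro acc cur; simp [segSpec]
  | cons x t ih =>
    intro acc cur
    by_cases hx : x = -1 <;> simp [segSpec, hx, ih]

-- segSpec equals B's index?-splitting recursion, with the open prefix `cur` prepended to the first segment
theorem segSpec_eq_alt (l : List Int) : ∀ (cur : List Int),
    segSpec cur l =
      match PySem.List.index? l (-1) with
      | none => []
      | some i => (cur ++ (l.take i).map (· + 1)) :: convert_to_element_list_py_alt (l.drop (i + 1)) := by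
  induction l with
  | nil => intro cur; simp [segSpec, PySem.List.index?]
  | cons x t ih =>
    intro cur
    by_cases hx : x = -1
    · subst hx
      rw [PySem.List.index?_cons_self]
      simp only [segSpec, List.take_zero, List.map_nil, List.append_nil,
        List.drop_succ_cons, List.drop_zero]
      rw [convert_to_element_list_py_alt, ih []]
      cases hi : PySem.List.index? t (-1) <;> simp
    · rw [PySem.List.index?_cons_of_ne t hx]
      simp only [segSpec, if_neg hx]
      rw [ih (cur ++ [x + 1])]
      cases hi : PySem.List.index? t (-1) with
      | none => simp
      | some i => simp [List.take_succ_cons, List.map_cons]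

-- ===== VERDICT (by name: the statement is the Claim_ definition above) =====
theorem convert_to_element_list_py_spec : Claim_equal_convert_to_element_list_py := by
  intro l _
  unfold Spec_convert_to_element_list_py convert_to_element_list_py
  rw [foldA_eq l [] [], List.nil_append, segSpec_eq_alt l []]
  rw [convert_to_element_list_py_alt]
  cases hi : PySem.List.index? l (-1) <;> simp
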